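-- pv_equiv track=rewrite | github.com/urparvezali/codes | B_Getting_Points.py | max_rest_days
-- ===== SOURCE A (Python) =====
-- def max_rest_days(n, t, l, P):
--     rest_days = 0
--     total_points = 0
--     tasks_completed = 0
--
--     for day in range(1, n + 1):
--         # If Monocarp decides to study
--         if tasks_completed < 2 and (day % 7 == 1 or tasks_completed > 0):
--             # Calculate points for attending a lesson
--             total_points += l
--             tasks_completed += 1
--         else:
--             # Monocarp rests
--             rest_days += 1
--             tasks_completed = 0  # Reset the completed tasks for the next study day
--
--     # Calculate points for the remaining tasks
--     total_points += min((n // 7) * t, 2 * t)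
--
--     # Check if the total points meet the requirement
--     if total_points >= P:
--         return rest_days
--     else:
--         return -1  # Monocarp cannot meet the requirement
-- ===== SOURCE B (Python) =====
-- def max_rest_days(n, t, l, P):
--     # Closed form: in each week days 1 and 2 (mod 7) are study days, the rest are free.
--     if n <= 0:
--         study = 0
--         rest = 0
--     else:
--         study = 2 * (n // 7) + min(n % 7, 2)
--         rest = n - study
--     total = l * study + min((n // 7) * t, 2 * t)
--     return rest if total >= P else -1
-- ===== Notes on version B (the rewrite author's own statement) =====
-- stated objective: faster
-- what changed: Replaced the day-by-day simulation loop with a closed-form count of study/rest days per 7-day week.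
import Mathlib
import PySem

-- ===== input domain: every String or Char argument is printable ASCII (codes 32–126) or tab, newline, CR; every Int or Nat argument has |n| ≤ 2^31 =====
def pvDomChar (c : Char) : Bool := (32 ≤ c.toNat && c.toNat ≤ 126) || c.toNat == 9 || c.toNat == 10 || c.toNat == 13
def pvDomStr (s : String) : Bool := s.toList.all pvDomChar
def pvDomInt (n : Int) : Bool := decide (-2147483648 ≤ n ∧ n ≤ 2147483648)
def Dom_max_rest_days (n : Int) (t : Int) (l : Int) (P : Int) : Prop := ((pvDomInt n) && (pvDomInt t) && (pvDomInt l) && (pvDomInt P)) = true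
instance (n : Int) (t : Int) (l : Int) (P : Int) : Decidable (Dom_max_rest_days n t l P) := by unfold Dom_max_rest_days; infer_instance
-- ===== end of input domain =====

-- B replaces A's day-by-day simulation loop with a closed-form per-week count (faster, O(1) vs O(n)).


-- ===== PORT A =====
-- one loop iteration: state = (rest_days, total_points, tasks_completed)
def pvStepA (l : Int) (s : Int × Int × Int) (day : Int) : Int × Int × Int :=
  if s.2.2 < 2 ∧ (PySem.Int.mod day 7 = 1 ∨ s.2.2 > 0) then
    (s.1, s.2.1 + l, s.2.2 + 1)
  else
    (s.1 + 1, s.2.1, 0)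

def max_rest_days (n : Int) (t : Int) (l : Int) (P : Int) : Int :=
  let st := (PySem.List.pyRange 1 (n + 1) 1).foldl (pvStepA l) (0, 0, 0)
  let total_points := st.2.1 + min (PySem.Int.floordiv n 7 * t) (2 * t)
  if total_points ≥ P then st.1 else -1

-- ===== PORT B =====
def max_rest_days_alt (n : Int) (t : Int) (l : Int) (P : Int) : Int :=
  let study := if n ≤ 0 then 0 else 2 * PySem.Int.floordiv n 7 + min (PySem.Int.mod n 7) 2
  let rest := if n ≤ 0 then 0 else n - study
  let total := l * study + min (PySem.Int.floordiv n 7 * t) (2 * t)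
  if total ≥ P then rest else -1

-- ===== PRECONDITION & SPEC =====
def Spec_max_rest_days (n : Int) (t : Int) (l : Int) (P : Int) (out : Int) : Prop := out = max_rest_days_alt n t l P
instance (n : Int) (t : Int) (l : Int) (P : Int) (out : Int) : Decidable (Spec_max_rest_days n t l P out) := by unfold Spec_max_rest_days; infer_instance

-- ===== CLAIM (what is proved, stated in full; the proofs are below) =====
def Claim_equal_max_rest_days : Prop := ∀ (n : Int) (t : Int) (l : Int) (P : Int), Dom_max_rest_days n t l P → Spec_max_rest_days n t l P (max_rest_days n t l P)

-- ===== LEMMAS AND PROOFS =====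

-- study days among days 1..m, and tasks_completed after day m
def pvS (m : Nat) : Int := 2 * ((m / 7 : Nat) : Int) + min (((m % 7 : Nat) : Int)) 2
def pvT (m : Nat) : Int := if m % 7 = 1 then 1 else if m % 7 = 2 then 2 else 0

lemma pvLoopA (l : Int) (m : Nat) :
    (PySem.List.pyRange 1 ((m : Int) + 1) 1).foldl (pvStepA l) (0, 0, 0)
      = ((m : Int) - pvS m, l * pvS m, pvT m) := by
  induction m with
  | zero =>
      rw [PySem.List.pyRange_one_eq_nil (by norm_num)]
      simp [pvS, pvT]
  | succ m ih =>
      have hsplit : PySem.List.pyRange 1 (((m : Int) + 1) + 1) 1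
          = PySem.List.pyRange 1 ((m : Int) + 1) 1 ++ [(m : Int) + 1] :=
        PySem.List.pyRange_one_succ_right (by omega)
      have hmod : PySem.Int.mod ((m : Int) + 1) 7 = ((m : Int) + 1) % 7 :=
        PySem.Int.mod_eq_emod_of_pos (by norm_num)
      push_cast
      rw [hsplit, List.foldl_append, ih]
      simp only [List.foldl, pvStepA, hmod]
      have h7 : m % 7 < 7 := Nat.mod_lt m (by norm_num)
      have hr7 : m % 7 = 0 ∨ m % 7 = 1 ∨ m % 7 = 2 ∨ m % 7 = 3 ∨ m % 7 = 4 ∨ m % 7 = 5 ∨ m % 7 = 6 := by omega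
      rcases hr7 with hr | hr | hr | hr | hr | hr | hr
      · have hm1 : (m + 1) % 7 = 1 := by omega
        have hq1 : (m + 1) / 7 = m / 7 := by omega
        have hd : ((m : Int) + 1) % 7 = 1 := by omega
        simp only [pvS, pvT, hr, hm1, hq1, hd]
        rw [if_pos (by norm_num)]
        simp only [Prod.mk.injEq]
        refine ⟨by push_cast; norm_num; try omega, by push_cast; norm_num; try ring, by norm_num⟩
      · have hm1 : (m + 1) % 7 = 2 := by omega
        have hq1 : (m + 1) / 7 = m / 7 := by omega
        have hd : ((m : Int) + 1) % 7 = 2 := by omega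
        simp only [pvS, pvT, hr, hm1, hq1, hd]
        rw [if_pos (by norm_num)]
        simp only [Prod.mk.injEq]
        refine ⟨by push_cast; norm_num; try omega, by push_cast; norm_num; try ring, by norm_num⟩
      · have hm1 : (m + 1) % 7 = 3 := by omega
        have hq1 : (m + 1) / 7 = m / 7 := by omega
        have hd : ((m : Int) + 1) % 7 = 3 := by omega
        simp only [pvS, pvT, hr, hm1, hq1, hd]
        rw [if_neg (by norm_num)]
        simp only [Prod.mk.injEq]
        refine ⟨by push_cast; norm_num; try omega, by push_cast; norm_num; try ring, by norm_num⟩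
      · have hm1 : (m + 1) % 7 = 4 := by omega
        have hq1 : (m + 1) / 7 = m / 7 := by omega
        have hd : ((m : Int) + 1) % 7 = 4 := by omega
        simp only [pvS, pvT, hr, hm1, hq1, hd]
        rw [if_neg (by norm_num)]
        simp only [Prod.mk.injEq]
        refine ⟨by push_cast; norm_num; try omega, by push_cast; norm_num; try ring, by norm_num⟩
      · have hm1 : (m + 1) % 7 = 5 := by omega
        have hq1 : (m + 1) / 7 = m / 7 := by omega
        have hd : ((m : Int) + 1) % 7 = 5 := by omega
        simp only [pvS, pvT, hr, hm1, hq1, hd]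
        rw [if_neg (by norm_num)]
        simp only [Prod.mk.injEq]
        refine ⟨by push_cast; norm_num; try omega, by push_cast; norm_num; try ring, by norm_num⟩
      · have hm1 : (m + 1) % 7 = 6 := by omega
        have hq1 : (m + 1) / 7 = m / 7 := by omega
        have hd : ((m : Int) + 1) % 7 = 6 := by omega
        simp only [pvS, pvT, hr, hm1, hq1, hd]
        rw [if_neg (by norm_num)]
        simp only [Prod.mk.injEq]
        refine ⟨by push_cast; norm_num; try omega, by push_cast; norm_num; try ring, by norm_num⟩
      · have hm1 : (m + 1) % 7 = 0 := by omega
        have hq1 : (m + 1) / 7 = m / 7 + 1 := by omega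
        have hd : ((m : Int) + 1) % 7 = 0 := by omega
        simp only [pvS, pvT, hr, hm1, hq1, hd]
        rw [if_neg (by norm_num)]
        simp only [Prod.mk.injEq]
        refine ⟨by push_cast; norm_num; try omega, by push_cast; rw [show min (6:Int) 2 = 2 from by norm_num, show min (0:Int) 2 = 0 from by norm_num]; ring, by norm_num⟩

-- ===== VERDICT (by name: the statement is the Claim_ definition above) =====
theorem max_rest_days_spec : Claim_equal_max_rest_days := by
  intro n t l P _
  unfold Spec_max_rest_days max_rest_days max_rest_days_alt
  by_cases hn : n ≤ 0
  · rw [PySem.List.pyRange_one_eq_nil (by omega)]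
    simp [hn]
  · obtain ⟨m, rfl⟩ : ∃ m : Nat, n = (m : Int) := ⟨n.toNat, by omega⟩
    rw [pvLoopA]
    have h1 : PySem.Int.floordiv (m : Int) 7 = ((m / 7 : Nat) : Int) := by
      exact_mod_cast PySem.Int.floordiv_natCast m 7
    have h2 : PySem.Int.mod (m : Int) 7 = ((m % 7 : Nat) : Int) := by
      exact_mod_cast PySem.Int.mod_natCast m 7
    have hS : pvS m = 2 * PySem.Int.floordiv (m : Int) 7 + min (PySem.Int.mod (m : Int) 7) 2 := by
      unfold pvS; rw [h1, h2]
    rw [if_neg (by omega : ¬ (m : Int) ≤ 0), hS]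
    have hm0 : ¬ m = 0 := by omega
    simp [mul_comm, hm0]
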